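-- pv_equiv track=rewrite | github.com/NamraKanabi/CSC_2022_Proj3 | assignment1.py | data_sort
-- ===== SOURCE A (Python) =====
-- def data_sort(book_dict,student_dict,borrow_dict,return_dict):
--     class_list=[]
--     class_data={}
--     temp_list=[]
--     not_ret=[]
--     due_list=[]
--
--     for key,value in student_dict.items(): #for loop used to sort data by classes
--         class_list.append(value[1])
--     class_list=list(set(class_list))
--     class_list.sort()
--     for x in class_list:
--         temp_list=[]
--         for key,value in student_dict.items():
--             if value[1]==x:
--                 temp_list.append(key)
--         class_data[x]=temp_list
--
--     for key,value in borrow_dict.items(): #for loop used to sort data for table 1 and 2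
--         if key not in return_dict.keys():
--             not_ret.append(key)
--
--         elif return_dict[key][2]==1 or return_dict[key][2]==2:
--             not_ret.append(key)
--             if return_dict[key][2]==1:
--                 due_list.append(key)
--         if key in return_dict.keys() and return_dict[key][2]>3:
--             due_list.append(key)
--
--     return not_ret,class_data,due_list
-- ===== SOURCE B (Python) =====
-- def data_sort(book_dict, student_dict, borrow_dict, return_dict):
--     # pre-create one bucket per class (sorted), fill in a single pass; tables via filters
--     pairs = [(info[1], name) for name, info in student_dict.items()]
--     classes = sorted({c for c, _ in pairs})
--     class_data = {c: [] for c in classes}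
--     for c, name in pairs:
--         class_data[c].append(name)
--
--     def status(k):
--         rec = return_dict.get(k)
--         return None if rec is None else rec[2]
--
--     keys = list(borrow_dict)
--     not_ret = [k for k in keys if status(k) is None or status(k) in (1, 2)]
--     due_list = [k for k in keys if status(k) is not None and (status(k) == 1 or status(k) > 3)]
--     return not_ret, class_data, due_list
-- ===== Notes on version B (the rewrite author's own statement) =====
-- stated objective: faster
-- what changed: B pre-creates one empty bucket per sorted class and fills all buckets in a single pass over the students (A rescans the whole student dict once per class), and replaces A's single branching loop over borrowed books by two independent filters over the keys driven by a status lookup.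
import Mathlib
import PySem

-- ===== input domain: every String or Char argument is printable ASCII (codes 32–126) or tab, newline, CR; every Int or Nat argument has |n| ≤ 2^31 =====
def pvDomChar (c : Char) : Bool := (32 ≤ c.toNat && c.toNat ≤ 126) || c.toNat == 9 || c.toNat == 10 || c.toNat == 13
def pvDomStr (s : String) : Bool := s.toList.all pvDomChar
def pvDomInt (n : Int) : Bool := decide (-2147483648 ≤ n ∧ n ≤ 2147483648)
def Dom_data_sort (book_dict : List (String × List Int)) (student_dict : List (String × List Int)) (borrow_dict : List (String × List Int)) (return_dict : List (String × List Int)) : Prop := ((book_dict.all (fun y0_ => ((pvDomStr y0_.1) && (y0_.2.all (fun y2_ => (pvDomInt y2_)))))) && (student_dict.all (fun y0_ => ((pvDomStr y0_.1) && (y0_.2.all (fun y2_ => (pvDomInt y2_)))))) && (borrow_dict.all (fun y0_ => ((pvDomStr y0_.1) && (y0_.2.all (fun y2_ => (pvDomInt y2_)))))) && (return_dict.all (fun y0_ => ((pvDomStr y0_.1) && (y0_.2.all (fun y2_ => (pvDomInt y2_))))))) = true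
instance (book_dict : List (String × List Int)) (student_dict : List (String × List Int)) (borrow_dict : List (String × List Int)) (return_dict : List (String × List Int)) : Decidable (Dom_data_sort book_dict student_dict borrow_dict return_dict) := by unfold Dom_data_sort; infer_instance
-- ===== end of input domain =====

-- B pre-creates one empty bucket per sorted class and fills all buckets in one pass over the
-- students (A rescans all students once per class), and replaces A's branching loop over the
-- borrowed books by two independent filters driven by a status lookup (objective: faster).

-- ===== PORT A =====
def data_sort (book_dict : List (String × List Int)) (student_dict : List (String × List Int)) (borrow_dict : List (String × List Int)) (return_dict : List (String × List Int)) : List String × (List (Int × List String)) × List String :=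
  let _ := book_dict
  -- class_list: append value[1] for every student (pyGetD total under Pre_)
  let class_list : List Int :=
    student_dict.foldl (fun acc kv => acc ++ [PySem.List.pyGetD kv.2 1 0]) []
  -- class_list = list(set(class_list)); class_list.sort()
  let class_list : List Int :=
    PySem.List.sorted (PySem.Set.ofList class_list) (fun x => x) false
  -- class_data[x] = [key for key,value in student_dict.items() if value[1]==x]
  let class_data : List (Int × List String) :=
    class_list.foldl (fun cd x =>
      cd ++ [(x, student_dict.foldl
        (fun tl kv => if PySem.List.pyGetD kv.2 1 0 = x then tl ++ [kv.1] else tl) [])]) []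
  -- loop over borrow_dict building not_ret and due_list
  let nr_dl : List String × List String :=
    borrow_dict.foldl (fun p kv =>
      match PySem.Dict.get? (PySem.Dict.mk return_dict) kv.1 with
      | none => (p.1 ++ [kv.1], p.2)
      | some v =>
        let s := PySem.List.pyGetD v 2 0
        let p1 : List String × List String :=
          if s = 1 ∨ s = 2 then
            (p.1 ++ [kv.1], if s = 1 then p.2 ++ [kv.1] else p.2)
          else p
        if s > 3 then (p1.1, p1.2 ++ [kv.1]) else p1) ([], [])
  (nr_dl.1, class_data, nr_dl.2)

-- ===== PORT B =====
-- status(k): return_dict.get(k) and its third field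
def pvStatus (return_dict : List (String × List Int)) (k : String) : Option Int :=
  (PySem.Dict.get? (PySem.Dict.mk return_dict) k).map (fun rec => PySem.List.pyGetD rec 2 0)

def data_sort_alt (book_dict : List (String × List Int)) (student_dict : List (String × List Int)) (borrow_dict : List (String × List Int)) (return_dict : List (String × List Int)) : List String × (List (Int × List String)) × List String :=
  let _ := book_dict
  -- pairs = [(info[1], name) ...]
  let pairs : List (Int × String) :=
    student_dict.map (fun kv => (PySem.List.pyGetD kv.2 1 0, kv.1))
  -- classes = sorted({c for c,_ in pairs})
  let classes : List Int :=
    PySem.List.sorted (PySem.Set.ofList (pairs.map (·.1))) (fun x => x) false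
  -- class_data = {c: [] for c in classes}, then fill in one pass
  let class_data : PySem.Dict Int (List String) :=
    pairs.foldl (fun d p => d.modify p.1 [] (fun b => b ++ [p.2]))
      (PySem.Dict.mk (classes.map (fun c => (c, ([] : List String)))))
  -- keys = list(borrow_dict); two filters by status
  let keys : List String := borrow_dict.map (·.1)
  let not_ret : List String :=
    keys.filter (fun k => match pvStatus return_dict k with
      | none => true | some s => s == 1 || s == 2)
  let due_list : List String :=
    keys.filter (fun k => match pvStatus return_dict k with
      | none => false | some s => s == 1 || s > 3)
  (not_ret, class_data.items, due_list)

-- ===== PRECONDITION & SPEC =====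
-- Pre_ excludes exactly the inputs where the Python raises IndexError: a student record of
-- length < 2 (value[1]) or a returned record of a borrowed book of length < 3 (return_dict[key][2]).
def Pre_data_sort (book_dict : List (String × List Int)) (student_dict : List (String × List Int)) (borrow_dict : List (String × List Int)) (return_dict : List (String × List Int)) : Prop :=
  (∀ kv ∈ student_dict, 2 ≤ kv.2.length) ∧
  (∀ kv ∈ borrow_dict,
    Option.all (fun v => decide (3 ≤ v.length)) (PySem.Dict.get? (PySem.Dict.mk return_dict) kv.1) = true)
instance (book_dict : List (String × List Int)) (student_dict : List (String × List Int)) (borrow_dict : List (String × List Int)) (return_dict : List (String × List Int)) : Decidable (Pre_data_sort book_dict student_dict borrow_dict return_dict) := by unfold Pre_data_sort; infer_instance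

def pvWitness_data_sort : (List (String × List Int)) × (List (String × List Int)) × (List (String × List Int)) × (List (String × List Int)) :=
  ([("b1", [0])], [("amy", [1, 2]), ("bob", [0, 2]), ("cat", [2, 1])],
   [("b1", [0]), ("b2", [1])], [("b1", [0, 0, 4])])

def Spec_data_sort (book_dict : List (String × List Int)) (student_dict : List (String × List Int)) (borrow_dict : List (String × List Int)) (return_dict : List (String × List Int)) (out : List String × (List (Int × List String)) × List String) : Prop := out = data_sort_alt book_dict student_dict borrow_dict return_dict
instance (book_dict : List (String × List Int)) (student_dict : List (String × List Int)) (borrow_dict : List (String × List Int)) (return_dict : List (String × List Int)) (out : List String × (List (Int × List String)) × List String) : Decidable (Spec_data_sort book_dict student_dict borrow_dict return_dict out) := by unfold Spec_data_sort; infer_instance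

-- ===== CLAIM (what is proved, stated in full; the proofs are below) =====
def Claim_equal_data_sort : Prop := ∀ (book_dict : List (String × List Int)) (student_dict : List (String × List Int)) (borrow_dict : List (String × List Int)) (return_dict : List (String × List Int)), Dom_data_sort book_dict student_dict borrow_dict return_dict → Pre_data_sort book_dict student_dict borrow_dict return_dict → Spec_data_sort book_dict student_dict borrow_dict return_dict (data_sort book_dict student_dict borrow_dict return_dict)

-- ===== LEMMAS AND PROOFS =====

-- A's accumulating borrow loop computes B's two independent filters
theorem pv_borrow_fold (return_dict : List (String × List Int)) (l : List (String × List Int)) (p : List String × List String) :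
    l.foldl (fun (p : List String × List String) kv =>
      match PySem.Dict.get? (PySem.Dict.mk return_dict) kv.1 with
      | none => (p.1 ++ [kv.1], p.2)
      | some v =>
        let s := PySem.List.pyGetD v 2 0
        let p1 : List String × List String :=
          if s = 1 ∨ s = 2 then
            (p.1 ++ [kv.1], if s = 1 then p.2 ++ [kv.1] else p.2)
          else p
        if s > 3 then (p1.1, p1.2 ++ [kv.1]) else p1) p
    = (p.1 ++ (l.map (·.1)).filter (fun k => match pvStatus return_dict k with
        | none => true | some s => s == 1 || s == 2),
       p.2 ++ (l.map (·.1)).filter (fun k => match pvStatus return_dict k with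
        | none => false | some s => s == 1 || s > 3)) := by
  induction l generalizing p with
  | nil => simp
  | cons kv t ih =>
    simp only [List.foldl_cons, List.map_cons, List.filter_cons, ih, pvStatus]
    cases h : PySem.Dict.get? (PySem.Dict.mk return_dict) kv.1 with
    | none => simp
    | some v =>
      simp only [Option.map_some]
      set s := PySem.List.pyGetD v 2 0 with hs
      split_ifs with h1 h2 <;>
        simp_all [List.append_assoc] <;> omega

-- notation-free helpers about B's grouping dict, generic over the (class, name) pair list
-- cls pairs = sorted set of first components; init = one empty bucket per class; filled = the filled dict

theorem pv_map_fst_buckets (l : List Int) :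
    l.map ((fun x : Int × List String => x.1) ∘ (fun c => (c, ([] : List String)))) = l := by
  induction l with
  | nil => rfl
  | cons h t ih => simpa using ih

theorem pv_nodup_cls (pairs : List (Int × String)) :
    (PySem.List.sorted (PySem.Set.ofList (pairs.map (·.1))) (fun x => x) false).Nodup :=
  (PySem.List.sorted_perm _ _ _).nodup_iff.mpr (PySem.Set.nodup_ofList _)

theorem pv_keys_filled (pairs : List (Int × String)) :
    (pairs.foldl (fun d p => d.modify p.1 [] (fun b => b ++ [p.2]))
        (PySem.Dict.mk ((PySem.List.sorted (PySem.Set.ofList (pairs.map (·.1))) (fun x => x) false).map (fun c => (c, ([] : List String)))))).keys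
      = PySem.List.sorted (PySem.Set.ofList (pairs.map (·.1))) (fun x => x) false := by
  rw [PySem.Dict.keys_foldl_modify_key]
  simp only [PySem.Dict.keys_mk, List.map_map]
  rw [pv_map_fst_buckets, PySem.Set.update_eq_append_filter, List.filter_eq_nil_iff.mpr, List.append_nil]
  intro y hy
  have hmem : y ∈ pairs.map (·.1) := (PySem.Set.mem_ofList _ _).mp hy
  simp [PySem.Set.contains_eq_listContains, PySem.List.mem_sorted, PySem.Set.mem_ofList, hmem]

theorem pv_init_getD (pairs : List (Int × String)) (c : Int)
    (hc : c ∈ PySem.List.sorted (PySem.Set.ofList (pairs.map (·.1))) (fun x => x) false) :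
    (PySem.Dict.mk ((PySem.List.sorted (PySem.Set.ofList (pairs.map (·.1))) (fun x => x) false).map (fun c => (c, ([] : List String))))).getD c [] = [] := by
  apply PySem.Dict.getD_of_mem_items
  · exact List.mem_map.mpr ⟨c, hc, rfl⟩
  · simp only [PySem.Dict.keys_mk, List.map_map]
    rw [pv_map_fst_buckets]
    exact pv_nodup_cls pairs

theorem pv_getD_filled (pairs : List (Int × String)) (c : Int)
    (hc : c ∈ PySem.List.sorted (PySem.Set.ofList (pairs.map (·.1))) (fun x => x) false) :
    (pairs.foldl (fun d p => d.modify p.1 [] (fun b => b ++ [p.2]))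
        (PySem.Dict.mk ((PySem.List.sorted (PySem.Set.ofList (pairs.map (·.1))) (fun x => x) false).map (fun c => (c, ([] : List String)))))).getD c []
      = (pairs.filter (fun p => p.1 == c)).map (·.2) := by
  rw [PySem.Dict.getD_foldl_modify_append, pv_init_getD pairs c hc, List.nil_append]

theorem pv_items_filled (pairs : List (Int × String)) :
    (pairs.foldl (fun d p => d.modify p.1 [] (fun b => b ++ [p.2]))
        (PySem.Dict.mk ((PySem.List.sorted (PySem.Set.ofList (pairs.map (·.1))) (fun x => x) false).map (fun c => (c, ([] : List String)))))).items
      = (PySem.List.sorted (PySem.Set.ofList (pairs.map (·.1))) (fun x => x) false).map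
          (fun c => (c, (pairs.filter (fun p => p.1 == c)).map (·.2))) := by
  rw [PySem.Dict.items_eq_map_keys _ ?hnd ([] : List String)]
  · rw [pv_keys_filled]
    exact List.map_congr_left (fun c hc => by rw [pv_getD_filled pairs c hc])
  case hnd =>
    apply PySem.Dict.nodup_keys_foldl_modify_key
    simp only [PySem.Dict.keys_mk, List.map_map]
    rw [pv_map_fst_buckets]
    exact pv_nodup_cls pairs

-- ===== VERDICT (by name: the statement is the Claim_ definition above) =====
theorem data_sort_spec : Claim_equal_data_sort := by
  intro book_dict student_dict borrow_dict return_dict _ _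
  unfold Spec_data_sort data_sort data_sort_alt
  dsimp only
  rw [pv_borrow_fold]
  refine Prod.ext (by simp) (Prod.ext ?_ (by simp))
  -- class_data: both are (sorted classes).map (fun c => (c, names of class c in order))
  rw [PySem.List.foldl_append_singleton_eq_map, List.nil_append,
      PySem.List.foldl_append_singleton_eq_map, List.nil_append,
      pv_items_filled]
  simp only [List.map_map, Function.comp_def]
  apply List.map_congr_left
  intro c hc
  refine Prod.ext rfl ?_
  dsimp only
  rw [List.filter_map, List.map_map]
  have hif := PySem.List.foldl_append_if (l := student_dict)
    (p := fun kv => PySem.List.pyGetD kv.2 1 0 == c) (f := (·.1)) (acc := ([] : List String))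
  simp only [List.nil_append] at hif
  calc List.foldl (fun tl kv => if PySem.List.pyGetD kv.2 1 0 = c then tl ++ [kv.1] else tl) [] student_dict
      = List.foldl (fun acc x => if (PySem.List.pyGetD x.2 1 0 == c) = true then acc ++ [x.1] else acc) [] student_dict := by
        apply PySem.List.foldl_congr_mem
        intro tl kv _
        by_cases h : PySem.List.pyGetD kv.2 1 0 = c <;> simp [h]
    _ = _ := by rw [hif]; simp [Function.comp_def]
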